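-- pv_equiv track=rewrite | github.com/unboxing96/ALGO | 우테코/week_1/06.py | nicks
-- ===== SOURCE A (Python) =====
-- def nicks(forms):
--
--     names = []
--     for form in forms:
--         names.append(form[1])
--
--     result = []
--     for i in range(len(forms)):
--         for j in range(len(forms[i])):
--             for k in range(len(names) - 1):
--                 if k == i:
--                     continue
--                 if forms[i][1][j:j+2] in names[k]:
--                     result.append(forms[i][0])
--                     break
--     return result
-- ===== SOURCE B (Python) =====
-- def nicks(forms):
--     names = [form[1] for form in forms]
--     # Index every substring of length <= 2 of the eligible names (all but the last):
--     # gram -> (one index whose name contains it, True if two distinct indices do).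
--     grams = {}
--     for k, name in enumerate(names[:-1]):
--         for L in range(3):
--             for p in range(len(name) - L + 1):
--                 g = name[p:p + L]
--                 if g in grams:
--                     k0, two = grams[g]
--                     if not two and k0 != k:
--                         grams[g] = (k0, True)
--                 else:
--                     grams[g] = (k, False)
--     result = []
--     for i, form in enumerate(forms):
--         for j in range(len(form)):
--             s = names[i][j:j + 2]
--             if s in grams:
--                 k0, two = grams[s]
--                 ok = two or k0 != i
--             else:
--                 ok = False
--             if ok:
--                 result.append(form[0])
--     return result
-- ===== Notes on version B (the rewrite author's own statement) =====
-- stated objective: faster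
-- what changed: B builds, in one pass over the eligible names, a dictionary mapping every substring of length <= 2 (including the empty one) to (one index containing it, whether two distinct indices do), so each per-(i,j) membership test is an O(1) lookup instead of A's rescan of all other names; Pre_ excludes inputs where some row has fewer than 2 entries, on which A raises IndexError.
import Mathlib
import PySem

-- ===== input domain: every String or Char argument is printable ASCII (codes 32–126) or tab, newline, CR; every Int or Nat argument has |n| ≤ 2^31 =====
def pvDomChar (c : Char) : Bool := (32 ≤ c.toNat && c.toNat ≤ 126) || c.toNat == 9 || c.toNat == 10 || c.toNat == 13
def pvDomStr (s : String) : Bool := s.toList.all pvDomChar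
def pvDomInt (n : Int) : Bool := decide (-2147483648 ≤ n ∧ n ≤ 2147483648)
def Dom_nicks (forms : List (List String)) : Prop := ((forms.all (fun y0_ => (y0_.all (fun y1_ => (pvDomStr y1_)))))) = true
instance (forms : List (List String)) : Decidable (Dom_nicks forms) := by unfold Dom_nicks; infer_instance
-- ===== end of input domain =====

-- B replaces A's per-(i,j) rescan of all other names with a dictionary built once, mapping every
-- substring of length ≤ 2 of the eligible names to (one index containing it, whether two distinct
-- indices do); objective: faster.

-- ===== PORT A =====
def nicks (forms : List (List String)) : List String :=
  let names : List String :=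
    forms.foldl (fun ns form => ns ++ [PySem.List.pyGetD form 1 ""]) []
  (PySem.List.pyRange 0 forms.length 1).foldl (fun result i =>
    (PySem.List.pyRange 0 (PySem.List.pyGetD forms i []).length 1).foldl (fun result j =>
      if (PySem.List.pyRange 0 ((names.length : Int) - 1) 1).any (fun k =>
           (k != i) &&
           PySem.Str.isIn
             (PySem.Str.slice (PySem.List.pyGetD (PySem.List.pyGetD forms i []) 1 "")
               (some j) (some (j + 2)))
             (PySem.List.pyGetD names k ""))
      then result ++ [PySem.List.pyGetD (PySem.List.pyGetD forms i []) 0 ""]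
      else result) result) []

-- ===== PORT B =====
-- one dict update of Source B's inner loop body: register that index k's name contains gram g
def nicksAltTouch (grams : PySem.Dict String (Int × Bool)) (k : Int) (g : String) :
    PySem.Dict String (Int × Bool) :=
  if grams.contains g then
    let kt := grams.getD g (0, false)
    if !kt.2 && (kt.1 != k) then grams.insert g (kt.1, true) else grams
  else grams.insert g (k, false)

def nicks_alt (forms : List (List String)) : List String :=
  let names : List String := forms.map (fun form => PySem.List.pyGetD form 1 "")
  let grams : PySem.Dict String (Int × Bool) :=
    (PySem.List.enumerate (PySem.List.slice names none (some (-1)))).foldl (fun grams kn =>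
      (PySem.List.pyRange 0 3 1).foldl (fun grams L =>
        (PySem.List.pyRange 0 (PySem.Str.len kn.2 - L + 1) 1).foldl (fun grams p =>
          nicksAltTouch grams kn.1 (PySem.Str.slice kn.2 (some p) (some (p + L))))
          grams) grams) PySem.Dict.empty
  (PySem.List.enumerate forms).foldl (fun result ifm =>
    (PySem.List.pyRange 0 ifm.2.length 1).foldl (fun result j =>
      let s := PySem.Str.slice (PySem.List.pyGetD names ifm.1 "") (some j) (some (j + 2))
      let ok : Bool :=
        if grams.contains s then
          let kt := grams.getD s (0, false)
          kt.2 || (kt.1 != ifm.1)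
        else false
      if ok then result ++ [PySem.List.pyGetD ifm.2 0 ""] else result) result) []

-- ===== PRECONDITION & SPEC =====
-- Python A evaluates form[1] for every row (and form[0] on a match): it raises IndexError exactly
-- when some row has fewer than 2 entries; Pre_ admits precisely the inputs where A returns.
def Pre_nicks (forms : List (List String)) : Prop := ∀ form ∈ forms, 2 ≤ form.length
instance (forms : List (List String)) : Decidable (Pre_nicks forms) := by unfold Pre_nicks; infer_instance

def pvWitness_nicks : List (List String) := [["a1", "abc"], ["b2", "bcd"], ["c3", "xyz"]]

def Spec_nicks (forms : List (List String)) (out : List String) : Prop := out = nicks_alt forms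
instance (forms : List (List String)) (out : List String) : Decidable (Spec_nicks forms out) := by unfold Spec_nicks; infer_instance

-- ===== CLAIM (what is proved, stated in full; the proofs are below) =====
def Claim_equal_nicks : Prop := ∀ (forms : List (List String)), Dom_nicks forms → Pre_nicks forms → Spec_nicks forms (nicks forms)

-- ===== LEMMAS AND PROOFS =====

-- second entry of a row, the name A and B both read
def pvF (form : List String) : String := PySem.List.pyGetD form 1 ""
def pvNames (forms : List (List String)) : List String := forms.map pvF
def pvPool (forms : List (List String)) : List String := (pvNames forms).dropLast
-- "name number k (an eligible index) contains g as a substring"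
def pvOcc (forms : List (List String)) (g : String) (k : Int) : Prop :=
  0 ≤ k ∧ k.toNat < (pvPool forms).length ∧
    PySem.Str.isIn g ((pvPool forms).getD k.toNat "") = true
def pvSub (forms : List (List String)) (i j : Int) : String :=
  PySem.Str.slice (pvF (PySem.List.pyGetD forms i [])) (some j) (some (j + 2))
def pvCondA (forms : List (List String)) (i j : Int) : Bool :=
  (PySem.List.pyRange 0 (((pvNames forms).length : Int) - 1) 1).any (fun k =>
    (k != i) && PySem.Str.isIn (pvSub forms i j) (PySem.List.pyGetD (pvNames forms) k ""))
def pvGrams (forms : List (List String)) : PySem.Dict String (Int × Bool) :=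
  (PySem.List.enumerate (pvPool forms)).foldl (fun grams kn =>
    (PySem.List.pyRange 0 3 1).foldl (fun grams L =>
      (PySem.List.pyRange 0 (PySem.Str.len kn.2 - L + 1) 1).foldl (fun grams p =>
        nicksAltTouch grams kn.1 (PySem.Str.slice kn.2 (some p) (some (p + L))))
        grams) grams) PySem.Dict.empty
def pvCondB (forms : List (List String)) (i j : Int) : Bool :=
  if (pvGrams forms).contains (pvSub forms i j) then
    ((pvGrams forms).getD (pvSub forms i j) (0, false)).2 ||
      (((pvGrams forms).getD (pvSub forms i j) (0, false)).1 != i)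
  else false

lemma nicks_eq (forms : List (List String)) :
    nicks forms = (PySem.List.pyRange 0 forms.length 1).flatMap (fun i =>
      ((PySem.List.pyRange 0 (PySem.List.pyGetD forms i []).length 1).filter
          (fun j => pvCondA forms i j)).map
        (fun _ => PySem.List.pyGetD (PySem.List.pyGetD forms i []) 0 "")) := by
  unfold nicks pvCondA pvSub pvNames pvF
  simp only [PySem.List.foldl_append_singleton_eq_map, List.nil_append,
    PySem.List.foldl_append_if, PySem.List.foldl_append_eq_flatMap]

lemma pvGetD_names (forms : List (List String)) (i : Int) :
    PySem.List.pyGetD (forms.map (fun form => PySem.List.pyGetD form 1 "")) i "" =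
    PySem.List.pyGetD (PySem.List.pyGetD forms i []) 1 "" := by
  simpa using PySem.List.pyGetD_map (fun form => PySem.List.pyGetD form 1 "") forms i []

lemma nicks_alt_eq (forms : List (List String)) :
    nicks_alt forms = (PySem.List.pyRange 0 forms.length 1).flatMap (fun i =>
      ((PySem.List.pyRange 0 (PySem.List.pyGetD forms i []).length 1).filter
          (fun j => pvCondB forms i j)).map
        (fun _ => PySem.List.pyGetD (PySem.List.pyGetD forms i []) 0 "")) := by
  unfold nicks_alt pvCondB pvGrams pvPool pvNames pvSub pvF
  rw [PySem.List.enumerate_eq_map_pyRange forms []]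
  simp only [List.foldl_map, PySem.List.slice_to_neg_one, PySem.List.len_eq,
    pvGetD_names, PySem.List.foldl_append_if, PySem.List.foldl_append_eq_flatMap,
    List.nil_append]

lemma pool_getD (forms : List (List String)) (k : Nat) (h : k < (pvPool forms).length) :
    (pvPool forms).getD k "" = PySem.List.pyGetD (pvNames forms) (k : Int) "" := by
  unfold pvPool at *
  have h2 : k < (pvNames forms).length := by
    have : (List.dropLast (pvNames forms)).length = (pvNames forms).length - 1 := List.length_dropLast; omega
  rw [PySem.List.pyGetD_natCast, List.getD_eq_getElem _ _ h, List.getD_eq_getElem _ _ h2]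
  exact List.getElem_dropLast h

lemma condA_iff (forms : List (List String)) (i j : Int) :
    pvCondA forms i j = true ↔ ∃ k, pvOcc forms (pvSub forms i j) k ∧ k ≠ i := by
  unfold pvCondA pvOcc
  rw [List.any_eq_true]
  have hlen : (pvPool forms).length = (pvNames forms).length - 1 :=
    List.length_dropLast
  constructor
  · rintro ⟨k, hk, hcond⟩
    rw [PySem.List.mem_pyRange_one] at hk
    simp only [Bool.and_eq_true, bne_iff_ne] at hcond
    obtain ⟨hne, hin⟩ := hcond
    have hkn : (k.toNat : Int) = k := Int.toNat_of_nonneg hk.1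
    have hb : k.toNat < (pvPool forms).length := by omega
    refine ⟨k, ⟨hk.1, hb, ?_⟩, hne⟩
    rw [pool_getD forms k.toNat hb, hkn]
    exact hin
  · rintro ⟨k, ⟨hk0, hkb, hin⟩, hne⟩
    have hkn : (k.toNat : Int) = k := Int.toNat_of_nonneg hk0
    refine ⟨k, ?_, ?_⟩
    · rw [PySem.List.mem_pyRange_one]; omega
    · simp only [Bool.and_eq_true, bne_iff_ne]
      refine ⟨hne, ?_⟩
      rw [pool_getD forms k.toNat hkb, hkn] at hin
      exact hin


-- dictionary invariant: Q g k reads "pair (k, g) has been processed"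
def pvTouchInv (d : PySem.Dict String (Int × Bool)) (Q : String → Int → Prop) : Prop :=
  ∀ g : String,
    (d.get? g = none → ∀ k, ¬ Q g k) ∧
    (∀ k0 two, d.get? g = some (k0, two) →
      Q g k0 ∧ (two = false → ∀ k, Q g k → k = k0) ∧
        (two = true → ∃ k1 k2, k1 ≠ k2 ∧ Q g k1 ∧ Q g k2))

lemma touchInv_congr {d : PySem.Dict String (Int × Bool)} {Q Q' : String → Int → Prop}
    (h : pvTouchInv d Q) (hq : ∀ g k, Q g k ↔ Q' g k) : pvTouchInv d Q' := by
  intro g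
  obtain ⟨h1, h2⟩ := h g
  refine ⟨fun hn k hk => h1 hn k ((hq g k).mpr hk), fun k0 two hs => ?_⟩
  obtain ⟨ha, hb, hc⟩ := h2 k0 two hs
  refine ⟨(hq g k0).mp ha, fun ht k hk => hb ht k ((hq g k).mpr hk), fun ht => ?_⟩
  obtain ⟨k1, k2, hne, p1, p2⟩ := hc ht
  exact ⟨k1, k2, hne, (hq g k1).mp p1, (hq g k2).mp p2⟩

lemma touchInv_step (d : PySem.Dict String (Int × Bool)) (Q : String → Int → Prop)
    (k : Int) (g : String) (h : pvTouchInv d Q) :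
    pvTouchInv (nicksAltTouch d k g) (fun g' k' => Q g' k' ∨ (g' = g ∧ k' = k)) := by
  unfold nicksAltTouch
  by_cases hc : d.contains g = true
  · have hsome : (d.get? g).isSome := by rw [← PySem.Dict.contains_eq_isSome_get?]; exact hc
    obtain ⟨⟨k0, two⟩, hget⟩ := Option.isSome_iff_exists.mp hsome
    have hgetD : d.getD g (0, false) = (k0, two) := by
      rw [PySem.Dict.getD_eq_get?_getD, hget]; rfl
    obtain ⟨hQ0, huniq, hex⟩ := (h g).2 k0 two hget
    simp only [hc, if_true, hgetD]
    by_cases hbr : (!two && (k0 != k)) = true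
    · simp only [Bool.and_eq_true, Bool.not_eq_true', bne_iff_ne] at hbr
      obtain ⟨htwo, hk0k⟩ := hbr
      subst htwo
      have hcond : (!(false : Bool) && (k0 != k)) = true := by simp [hk0k]
      rw [if_pos hcond]
      intro g'
      by_cases hg : g' = g
      · subst hg
        rw [PySem.Dict.get?_insert_self]
        refine ⟨fun hn => by simp at hn, fun k0' two' heq => ?_⟩
        obtain ⟨hk0', htwo'⟩ : k0 = k0' ∧ two' = true := by
          simpa [Prod.ext_iff] using heq
        subst hk0'; subst htwo'
        exact ⟨Or.inl hQ0, fun hf => by simp at hf,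
          fun _ => ⟨k0, k, hk0k, Or.inl hQ0, Or.inr ⟨rfl, rfl⟩⟩⟩
      · rw [PySem.Dict.get?_insert_of_ne _ _ hg]
        obtain ⟨h1, h2⟩ := h g'
        refine ⟨fun hn k' hk' => ?_, fun k0' two' heq => ?_⟩
        · rcases hk' with hk' | ⟨hgg, _⟩
          · exact h1 hn k' hk'
          · exact hg hgg
        · obtain ⟨ha, hb, hcc⟩ := h2 k0' two' heq
          refine ⟨Or.inl ha, fun ht k' hk' => ?_, fun ht => ?_⟩
          · rcases hk' with hk' | ⟨hgg, _⟩
            · exact hb ht k' hk'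
            · exact absurd hgg hg
          · obtain ⟨k1, k2, hne, p1, p2⟩ := hcc ht
            exact ⟨k1, k2, hne, Or.inl p1, Or.inl p2⟩
    · rw [if_neg hbr]
      simp only [Bool.and_eq_true, Bool.not_eq_true', bne_iff_ne, not_and, not_not, ne_eq] at hbr
      intro g'
      by_cases hg : g' = g
      · subst hg
        refine ⟨fun hn => by rw [hn] at hget; simp at hget,
          fun k0' two' heq => ?_⟩
        rw [hget] at heq
        obtain ⟨hk0', htwo'⟩ : k0 = k0' ∧ two = two' := by
          simpa [Prod.ext_iff] using heq
        subst hk0'; subst htwo'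
        refine ⟨Or.inl hQ0, fun ht k' hk' => ?_, fun ht => ?_⟩
        · rcases hk' with hk' | ⟨_, hkk⟩
          · exact huniq ht k' hk'
          · subst hkk; subst ht; exact (hbr rfl).symm
        · obtain ⟨k1, k2, hne, p1, p2⟩ := hex ht
          exact ⟨k1, k2, hne, Or.inl p1, Or.inl p2⟩
      · obtain ⟨h1, h2⟩ := h g'
        refine ⟨fun hn k' hk' => ?_, fun k0' two' heq => ?_⟩
        · rcases hk' with hk' | ⟨hgg, _⟩
          · exact h1 hn k' hk'
          · exact hg hgg
        · obtain ⟨ha, hb, hcc⟩ := h2 k0' two' heq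
          refine ⟨Or.inl ha, fun ht k' hk' => ?_, fun ht => ?_⟩
          · rcases hk' with hk' | ⟨hgg, _⟩
            · exact hb ht k' hk'
            · exact absurd hgg hg
          · obtain ⟨k1, k2, hne, p1, p2⟩ := hcc ht
            exact ⟨k1, k2, hne, Or.inl p1, Or.inl p2⟩
  · have hnone : d.get? g = none := by
      rw [PySem.Dict.get?_eq_none_iff_contains]; exact Bool.eq_false_iff.mpr hc
    simp only [Bool.not_eq_true] at hc
    simp only [hc, Bool.false_eq_true, if_false]
    intro g'
    by_cases hg : g' = g
    · subst hg
      rw [PySem.Dict.get?_insert_self]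
      refine ⟨fun hn => by simp at hn, fun k0' two' heq => ?_⟩
      obtain ⟨hk0', htwo'⟩ : k = k0' ∧ false = two' := by
        simpa [Prod.ext_iff] using heq
      subst hk0'; subst htwo'
      refine ⟨Or.inr ⟨rfl, rfl⟩, fun _ k' hk' => ?_, fun ht => by simp at ht⟩
      rcases hk' with hk' | ⟨_, hkk⟩
      · exact absurd hk' ((h _).1 hnone k')
      · exact hkk
    · rw [PySem.Dict.get?_insert_of_ne _ _ hg]
      obtain ⟨h1, h2⟩ := h g'
      refine ⟨fun hn k' hk' => ?_, fun k0' two' heq => ?_⟩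
      · rcases hk' with hk' | ⟨hgg, _⟩
        · exact h1 hn k' hk'
        · exact hg hgg
      · obtain ⟨ha, hb, hcc⟩ := h2 k0' two' heq
        refine ⟨Or.inl ha, fun ht k' hk' => ?_, fun ht => ?_⟩
        · rcases hk' with hk' | ⟨hgg, _⟩
          · exact hb ht k' hk'
          · exact absurd hgg hg
        · obtain ⟨k1, k2, hne, p1, p2⟩ := hcc ht
          exact ⟨k1, k2, hne, Or.inl p1, Or.inl p2⟩

lemma touchInv_fold (P : List (Int × String)) :
    ∀ (d : PySem.Dict String (Int × Bool)) (Q : String → Int → Prop), pvTouchInv d Q →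
      pvTouchInv (P.foldl (fun d p => nicksAltTouch d p.1 p.2) d)
        (fun g k => Q g k ∨ (k, g) ∈ P) := by
  induction P with
  | nil =>
    intro d Q h
    exact touchInv_congr h (by simp)
  | cons p P ih =>
    intro d Q h
    simp only [List.foldl_cons]
    refine touchInv_congr (ih _ _ (touchInv_step d Q p.1 p.2 h)) ?_
    intro g k
    simp only [List.mem_cons, Prod.ext_iff]
    tauto


-- the flattened stream of (index, gram) pairs Source B's build loop processes
def pvPairs (forms : List (List String)) : List (Int × String) :=
  (PySem.List.enumerate (pvPool forms)).flatMap (fun kn =>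
    (PySem.List.pyRange 0 3 1).flatMap (fun L =>
      (PySem.List.pyRange 0 (PySem.Str.len kn.2 - L + 1) 1).map (fun p =>
        (kn.1, PySem.Str.slice kn.2 (some p) (some (p + L))))))

lemma grams_eq_fold (forms : List (List String)) :
    pvGrams forms =
      (pvPairs forms).foldl (fun d p => nicksAltTouch d p.1 p.2) PySem.Dict.empty := by
  unfold pvGrams pvPairs
  simp only [List.foldl_flatMap, List.foldl_map]

lemma grams_inv (forms : List (List String)) :
    pvTouchInv (pvGrams forms) (fun g k => (k, g) ∈ pvPairs forms) := by
  rw [grams_eq_fold]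
  have hbase : pvTouchInv PySem.Dict.empty (fun _ _ => False) := by
    refine fun g => ⟨fun _ k hk => hk, fun k0 two heq => ?_⟩
    rw [PySem.Dict.get?_empty] at heq; simp at heq
  refine touchInv_congr (touchInv_fold (pvPairs forms) _ _ hbase) ?_
  intro g k; simp

lemma take_drop_infix {α : Type} (l : List α) (n m : ℕ) : (l.drop n).take m <:+: l :=
  (List.take_prefix m (l.drop n)).isInfix.trans (List.drop_suffix n l).isInfix

lemma mem_pairs_iff (forms : List (List String)) (g : String) (k : Int)
    (hg2 : g.toList.length ≤ 2) :
    (k, g) ∈ pvPairs forms ↔ pvOcc forms g k := by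
  unfold pvPairs pvOcc
  simp only [List.mem_flatMap, List.mem_map, PySem.List.mem_enumerate_iff,
    PySem.List.mem_pyRange_one]
  constructor
  · rintro ⟨kn, ⟨m, hm, hkn⟩, L, hL, p, ⟨hp0, hpb⟩, hpair⟩
    subst hkn
    simp only [zero_add, Prod.ext_iff] at hpair
    obtain ⟨hk, hgeq⟩ := hpair
    have hL0 : (0 : Int) ≤ L := hL.1
    refine ⟨by omega, by omega, ?_⟩
    have hget : (pvPool forms).getD k.toNat "" = (pvPool forms)[m] := by
      rw [List.getD_eq_getElem _ _ (by omega : k.toNat < (pvPool forms).length)]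
      congr 1; omega
    rw [hget, PySem.Str.isIn_iff_infix, ← hgeq, PySem.Str.toList_slice,
      PySem.Chars.slice_eq_listSlice, PySem.List.slice_toNat _ hp0 (by omega)]
    exact take_drop_infix _ _ _
  · rintro ⟨hk0, hkb, hin⟩
    have hnm : (pvPool forms).getD k.toNat "" = (pvPool forms)[k.toNat] :=
      List.getD_eq_getElem _ _ hkb
    rw [hnm, PySem.Str.isIn_iff_infix] at hin
    obtain ⟨u, v, huv⟩ := hin
    set nm := (pvPool forms)[k.toNat] with hnmdef
    have hlen : u.length + g.toList.length + v.length = nm.toList.length := by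
      rw [← huv]; simp only [List.length_append]
    refine ⟨(↑k.toNat, nm), ⟨k.toNat, hkb, by simp [Int.toNat_of_nonneg hk0, hnmdef]⟩,
      (g.toList.length : Int), ⟨by omega, by omega⟩, (u.length : Int), ⟨by omega, ?_⟩, ?_⟩
    · show (u.length : Int) < PySem.Str.len nm - (g.toList.length : Int) + 1
      have h1 := PySem.Str.len_eq nm
      omega
    · refine Prod.ext ?_ ?_
      · simpa using Int.toNat_of_nonneg hk0
      · show PySem.Str.slice nm _ _ = g
        apply String.toList_inj.mp
        rw [PySem.Str.toList_slice, PySem.Chars.slice_eq_listSlice,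
          PySem.List.slice_toNat _ (by omega) (by omega)]
        rw [show ((u.length : Int) + (g.toList.length : Int)).toNat - (u.length : Int).toNat
              = g.toList.length from by omega]
        rw [show ((u.length : Int)).toNat = u.length from by omega]
        rw [← huv, List.append_assoc, List.drop_left, List.take_left]


lemma sub_len_le (forms : List (List String)) (i j : Int) (hj : 0 ≤ j) :
    (pvSub forms i j).toList.length ≤ 2 := by
  unfold pvSub
  rw [PySem.Str.toList_slice, PySem.Chars.slice_eq_listSlice,
    PySem.List.slice_toNat _ hj (by omega),
    show (j + 2).toNat - j.toNat = 2 from by omega]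
  exact List.length_take_le _ _

lemma condB_iff (forms : List (List String)) (i j : Int) (hj : 0 ≤ j) :
    pvCondB forms i j = true ↔ ∃ k, pvOcc forms (pvSub forms i j) k ∧ k ≠ i := by
  unfold pvCondB
  have hlen2 := sub_len_le forms i j hj
  have hmp := fun k => mem_pairs_iff forms (pvSub forms i j) k hlen2
  have hinv := grams_inv forms (pvSub forms i j)
  by_cases hc : (pvGrams forms).contains (pvSub forms i j) = true
  · rw [if_pos hc]
    have hsome : ((pvGrams forms).get? (pvSub forms i j)).isSome := by
      rw [← PySem.Dict.contains_eq_isSome_get?]; exact hc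
    obtain ⟨⟨k0, two⟩, hget⟩ := Option.isSome_iff_exists.mp hsome
    have hgetD : (pvGrams forms).getD (pvSub forms i j) (0, false) = (k0, two) := by
      rw [PySem.Dict.getD_eq_get?_getD, hget]; rfl
    rw [hgetD]
    obtain ⟨hQ0, huniq, hex⟩ := hinv.2 k0 two hget
    cases two
    · simp only [Bool.false_or, bne_iff_ne, ne_eq]
      constructor
      · intro hne; exact ⟨k0, (hmp k0).mp hQ0, hne⟩
      · rintro ⟨k, hocc, hne⟩
        have hk := huniq rfl k ((hmp k).mpr hocc)
        exact hk ▸ hne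
    · simp only [Bool.true_or, true_iff]
      obtain ⟨k1, k2, hne12, p1, p2⟩ := hex rfl
      by_cases hk1 : k1 = i
      · exact ⟨k2, (hmp k2).mp p2, by omega⟩
      · exact ⟨k1, (hmp k1).mp p1, hk1⟩
  · rw [if_neg hc]
    simp only [Bool.false_eq_true, false_iff]
    rintro ⟨k, hocc, -⟩
    exact hinv.1
      (by rw [PySem.Dict.get?_eq_none_iff_contains]; exact Bool.eq_false_iff.mpr hc)
      k ((hmp k).mpr hocc)

-- ===== VERDICT (by name: the statement is the Claim_ definition above) =====
theorem nicks_spec : Claim_equal_nicks := by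
  intro forms _ _
  unfold Spec_nicks
  rw [nicks_eq, nicks_alt_eq]
  apply List.flatMap_congr
  intro i hi
  congr 1
  apply List.filter_congr
  intro j hj
  have hj0 : 0 ≤ j := (PySem.List.mem_pyRange_one.mp hj).1
  exact Bool.eq_iff_iff.mpr ((condA_iff forms i j).trans (condB_iff forms i j hj0).symm)
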